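-- pv_equiv track=rewrite | github.com/danparshall/lobby_analysis | src/scoring/statute_retrieval.py | pick_year_within_tolerance
-- ===== SOURCE A (Python) =====
-- from typing import Iterable, Literal
--
-- Direction = Literal["exact", "pre", "post", "none"]
--
-- def pick_year_within_tolerance(
--     years: list[int],
--     target: int,
--     tolerance: int,
-- ) -> tuple[int, int, Direction] | None:
--     """Pick the best year within ±tolerance of target.
--
--     Tie-break rule: if two years are equidistant, prefer the pre-target year
--     (direction="pre") because PRI scored late-2009 law — a pre-2010 vintage
--     may miss late-2009 changes but a post-2010 vintage may include reforms
--     PRI never saw.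
--
--     Returns (chosen_year, year_delta, direction) or None if no candidate
--     within tolerance. Direction is "exact" (delta=0), "pre" (delta<0), or
--     "post" (delta>0).
--     """
--     candidates = [y for y in years if abs(y - target) <= tolerance]
--     if not candidates:
--         return None
--     # Sort key: (distance, direction_priority) — closer first, pre preferred.
--     def _key(y: int) -> tuple[int, int]:
--         dist = abs(y - target)
--         direction_priority = 0 if y <= target else 1
--         return (dist, direction_priority)
--
--     chosen = min(candidates, key=_key)
--     delta = chosen - target
--     if delta == 0:
--         direction: Direction = "exact"
--     elif delta < 0:
--         direction = "pre"
--     else: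
--         direction = "post"
--     return chosen, delta, direction
-- ===== SOURCE B (Python) =====
-- def pick_year_within_tolerance(years, target, tolerance):
--     # One pass: best pre-or-exact candidate (max y <= target) and best post
--     # candidate (min y > target) within tolerance; combine, tie favours pre.
--     pre = None
--     post = None
--     for y in years:
--         if target - tolerance <= y <= target:
--             if pre is None or y > pre:
--                 pre = y
--         elif target < y <= target + tolerance:
--             if post is None or y < post:
--                 post = y
--     if pre is None and post is None:
--         return None
--     if pre is None:
--         chosen = post
--     elif post is None:
--         chosen = pre
--     elif post - target < target - pre:
--         chosen = post
--     else:
--         chosen = pre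
--     delta = chosen - target
--     direction = "exact" if delta == 0 else ("pre" if delta < 0 else "post")
--     return chosen, delta, direction
-- ===== Notes on version B (the rewrite author's own statement) =====
-- stated objective: alternative
-- what changed: Replaces build-candidate-list + min with a lexicographic (distance, pre/post) key by a single pass maintaining only two scalars: the maximum in-tolerance year <= target and the minimum in-tolerance year > target, combined at the end with the pre-favouring tie-break.
import Mathlib
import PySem

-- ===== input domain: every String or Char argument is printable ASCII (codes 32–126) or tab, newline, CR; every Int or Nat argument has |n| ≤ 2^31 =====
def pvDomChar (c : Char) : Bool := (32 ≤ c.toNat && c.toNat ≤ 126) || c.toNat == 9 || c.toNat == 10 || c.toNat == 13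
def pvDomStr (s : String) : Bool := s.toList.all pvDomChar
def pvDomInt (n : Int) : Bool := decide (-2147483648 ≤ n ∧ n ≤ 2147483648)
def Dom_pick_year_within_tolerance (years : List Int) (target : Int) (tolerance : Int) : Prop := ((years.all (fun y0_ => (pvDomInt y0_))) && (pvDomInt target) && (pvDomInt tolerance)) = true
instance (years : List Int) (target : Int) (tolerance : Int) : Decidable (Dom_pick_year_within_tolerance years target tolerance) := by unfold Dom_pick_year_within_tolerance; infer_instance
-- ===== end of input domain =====

-- B replaces filter + min-by-(distance, pre/post)-key with a single pass keeping two
-- scalars (max in-tolerance year ≤ target, min in-tolerance year > target), combined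
-- with the pre-favouring tie-break at the end (alternative decomposition, same cost).

-- ===== PORT A =====
def pick_year_within_tolerance (years : List Int) (target : Int) (tolerance : Int) : Option (Int × Int × String) :=
  let candidates := years.filter (fun y => decide (|y - target| ≤ tolerance))
  -- 'if not candidates: return None' = the none branch of min2? (none iff candidates = [])
  match PySem.List.min2? candidates (fun y => |y - target|) (fun y => if y ≤ target then (0 : Int) else 1) with
  | none => none
  | some chosen =>
    let delta := chosen - target
    let direction : String := if delta = 0 then "exact" else if delta < 0 then "pre" else "post"
    some (chosen, delta, direction)

-- ===== PORT B =====
-- loop body of B: update (pre, post) with year y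
def pyAltStep (target tolerance : Int) (s : Option Int × Option Int) (y : Int) : Option Int × Option Int :=
  if target - tolerance ≤ y ∧ y ≤ target then
    match s.1 with
    | none => (some y, s.2)
    | some p => if p < y then (some y, s.2) else s
  else if target < y ∧ y ≤ target + tolerance then
    match s.2 with
    | none => (s.1, some y)
    | some q => if y < q then (s.1, some y) else s
  else s

-- final combination of B: choose between pre and post (tie favours pre)
def pyAltCombine (target : Int) (s : Option Int × Option Int) : Option Int :=
  match s with
  | (none, none) => none
  | (some p, none) => some p
  | (none, some q) => some q
  | (some p, some q) => if q - target < target - p then some q else some p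

def pick_year_within_tolerance_alt (years : List Int) (target : Int) (tolerance : Int) : Option (Int × Int × String) :=
  let s := years.foldl (pyAltStep target tolerance) (none, none)
  match pyAltCombine target s with
  | none => none
  | some chosen =>
    let delta := chosen - target
    let direction : String := if delta = 0 then "exact" else if delta < 0 then "pre" else "post"
    some (chosen, delta, direction)

-- ===== PRECONDITION & SPEC =====
def Spec_pick_year_within_tolerance (years : List Int) (target : Int) (tolerance : Int) (out : Option (Int × Int × String)) : Prop := out = pick_year_within_tolerance_alt years target tolerance
instance (years : List Int) (target : Int) (tolerance : Int) (out : Option (Int × Int × String)) : Decidable (Spec_pick_year_within_tolerance years target tolerance out) := by unfold Spec_pick_year_within_tolerance; infer_instance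

-- ===== CLAIM (what is proved, stated in full; the proofs are below) =====
def Claim_equal_pick_year_within_tolerance : Prop := ∀ (years : List Int) (target : Int) (tolerance : Int), Dom_pick_year_within_tolerance years target tolerance → Spec_pick_year_within_tolerance years target tolerance (pick_year_within_tolerance years target tolerance)

-- ===== LEMMAS AND PROOFS =====

-- A's fold step, with the candidate filter pushed inside (via List.foldl_filter)
def stepA (target tolerance : Int) (acc : Option Int) (y : Int) : Option Int :=
  if decide (|y - target| ≤ tolerance) = true then
    match acc with
    | none => some y
    | some m =>
      if (decide (|y - target| < |m - target|) ||
          !decide (|m - target| < |y - target|) &&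
          decide ((if y ≤ target then (0 : Int) else 1) < (if m ≤ target then (0 : Int) else 1))) = true
      then some y else some m
  else acc

theorem minA_eq_foldl (years : List Int) (target tolerance : Int) :
    PySem.List.min2? (years.filter (fun y => decide (|y - target| ≤ tolerance)))
      (fun y => |y - target|) (fun y => if y ≤ target then (0 : Int) else 1)
    = years.foldl (stepA target tolerance) none := by
  unfold PySem.List.min2?
  rw [List.foldl_filter]
  congr 1
  funext acc y
  cases acc <;> rfl

-- the invariant kept by B's state
def InvPre (target tolerance : Int) (p : Option Int) : Prop :=
  ∀ x, p = some x → target - tolerance ≤ x ∧ x ≤ target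
def InvPost (target tolerance : Int) (q : Option Int) : Prop :=
  ∀ x, q = some x → target < x ∧ x ≤ target + tolerance

theorem inv_step (target tolerance : Int) (s : Option Int × Option Int) (y : Int)
    (hp : InvPre target tolerance s.1) (hq : InvPost target tolerance s.2) :
    InvPre target tolerance (pyAltStep target tolerance s y).1 ∧
    InvPost target tolerance (pyAltStep target tolerance s y).2 := by
  obtain ⟨p, q⟩ := s
  unfold InvPre InvPost at *
  unfold pyAltStep
  split_ifs with h1 h2 <;> rcases p with _ | p <;> rcases q with _ | q <;>
    simp_all <;> split_ifs <;> simp_all <;> omega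

set_option maxHeartbeats 8000000 in
theorem step_commute (target tolerance : Int) (s : Option Int × Option Int) (y : Int)
    (hp : InvPre target tolerance s.1) (hq : InvPost target tolerance s.2) :
    stepA target tolerance (pyAltCombine target s) y
      = pyAltCombine target (pyAltStep target tolerance s y) := by
  obtain ⟨p, q⟩ := s
  unfold InvPre InvPost at *
  rcases p with _ | p <;> rcases q with _ | q
  · rcases abs_cases (y - target) with ⟨he, hs⟩ | ⟨he, hs⟩ <;>
      (simp only [stepA, pyAltStep, pyAltCombine, he, decide_eq_true_eq, Bool.or_eq_true,
        Bool.and_eq_true, Bool.not_eq_true, decide_eq_false_iff_not]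
       split_ifs <;> (try simp_all) <;> (try split_ifs) <;> (try simp only [Option.some.injEq]) <;>
         (first | rfl | omega | (exfalso; omega)))
  · have hq' := hq q rfl
    have e2 : |q - target| = q - target := abs_of_nonneg (by omega)
    rcases abs_cases (y - target) with ⟨he, hs⟩ | ⟨he, hs⟩ <;>
      (simp only [stepA, pyAltStep, pyAltCombine, he, e2, decide_eq_true_eq, Bool.or_eq_true,
        Bool.and_eq_true, Bool.not_eq_true, decide_eq_false_iff_not]
       split_ifs <;> (try simp_all) <;> (try split_ifs) <;> (try simp only [Option.some.injEq]) <;>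
         (first | rfl | omega | (exfalso; omega)))
  · have hp' := hp p rfl
    have e1 : |p - target| = target - p := by rw [abs_of_nonpos (by omega : p - target ≤ 0)]; ring
    rcases abs_cases (y - target) with ⟨he, hs⟩ | ⟨he, hs⟩ <;>
      (simp only [stepA, pyAltStep, pyAltCombine, he, e1, decide_eq_true_eq, Bool.or_eq_true,
        Bool.and_eq_true, Bool.not_eq_true, decide_eq_false_iff_not]
       split_ifs <;> (try simp_all) <;> (try split_ifs) <;> (try simp only [Option.some.injEq]) <;>
         (first | rfl | omega | (exfalso; omega)))
  · have hp' := hp p rfl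
    have hq' := hq q rfl
    have e1 : |p - target| = target - p := by rw [abs_of_nonpos (by omega : p - target ≤ 0)]; ring
    have e2 : |q - target| = q - target := abs_of_nonneg (by omega)
    have hcomb : pyAltCombine target (some p, some q)
        = if q - target < target - p then some q else some p := rfl
    by_cases hc : q - target < target - p
    · rw [hcomb, if_pos hc]
      rcases abs_cases (y - target) with ⟨he, hs⟩ | ⟨he, hs⟩ <;>
        (simp only [stepA, pyAltStep, pyAltCombine, he, e1, e2, decide_eq_true_eq, Bool.or_eq_true,
          Bool.and_eq_true, Bool.not_eq_true, decide_eq_false_iff_not]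
         split_ifs <;> (try simp_all) <;> (try split_ifs) <;> (try simp only [Option.some.injEq]) <;>
           (first | rfl | omega | (exfalso; omega)))
    · rw [hcomb, if_neg hc]
      rcases abs_cases (y - target) with ⟨he, hs⟩ | ⟨he, hs⟩ <;>
        (simp only [stepA, pyAltStep, pyAltCombine, he, e1, e2, decide_eq_true_eq, Bool.or_eq_true,
          Bool.and_eq_true, Bool.not_eq_true, decide_eq_false_iff_not]
         split_ifs <;> (try simp_all) <;> (try split_ifs) <;> (try simp only [Option.some.injEq]) <;>
           (first | rfl | omega | (exfalso; omega)))

theorem fold_commute (target tolerance : Int) (years : List Int)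
    (s : Option Int × Option Int)
    (hp : InvPre target tolerance s.1) (hq : InvPost target tolerance s.2) :
    years.foldl (stepA target tolerance) (pyAltCombine target s)
      = pyAltCombine target (years.foldl (pyAltStep target tolerance) s) := by
  induction years generalizing s with
  | nil => rfl
  | cons y ys ih =>
    simp only [List.foldl_cons]
    rw [step_commute target tolerance s y hp hq]
    exact ih _ (inv_step target tolerance s y hp hq).1 (inv_step target tolerance s y hp hq).2

-- ===== VERDICT (by name: the statement is the Claim_ definition above) =====
theorem pick_year_within_tolerance_spec : Claim_equal_pick_year_within_tolerance := by
  intro years target tolerance _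
  unfold Spec_pick_year_within_tolerance
  have h := fold_commute target tolerance years (none, none)
    (by intro x hx; cases hx) (by intro x hx; cases hx)
  have h0 : pyAltCombine target ((none : Option Int), (none : Option Int)) = none := rfl
  rw [h0] at h
  simp only [pick_year_within_tolerance, pick_year_within_tolerance_alt, minA_eq_foldl, h]
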